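-- pv_equiv track=rewrite | github.com/alfahimmohammad/Medical-Image-Analysis-Assignments-IITM | PA3/assignment_3.py | peaker
-- ===== SOURCE A (Python) =====
-- def pitter(peak, pit, ppv, hist):
--     if pit == len(hist)-1:
--         if hist[pit]<hist[pit-1]:
--             ppv.append(pit)
--             return ppv
--         else:
--             return ppv
--     elif hist[pit-1]>hist[pit] and hist[pit]<=hist[pit+1]:
--         ppv.append(pit)
--         peak = pit + 1
--         return peaker(peak, pit, ppv, hist)
--     else:
--         pit += 1
--         return pitter(peak, pit, ppv, hist)
--
-- def peaker(peak, pit, ppv, hist):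
--     if peak ==0 and hist[peak]>hist[peak+1]:
--         ppv.append(peak)
--         pit = peak + 1
--         return pitter(peak, pit, ppv, hist)
--     elif peak == len(hist)-1:
--         return ppv
--     elif hist[peak-1]<=hist[peak] and hist[peak]>hist[peak+1]:
--         ppv.append(peak)
--         pit = peak + 1
--         return pitter(peak, pit, ppv, hist)
--     else:
--         peak += 1
--         return peaker(peak, pit, ppv, hist)
-- ===== SOURCE B (Python) =====
-- def peaker(peak, pit, ppv, hist):
--     # One iterative scan with a peak/pit mode flag instead of two mutually
--     # recursive functions; appends to ppv in place like the original.
--     n = len(hist)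
--     i = peak
--     seeking_peak = True
--     while i != n - 1:
--         if seeking_peak:
--             if (i == 0 or hist[i - 1] <= hist[i]) and hist[i] > hist[i + 1]:
--                 ppv.append(i)
--                 seeking_peak = False
--         else:
--             if hist[i - 1] > hist[i] and hist[i] <= hist[i + 1]:
--                 ppv.append(i)
--                 seeking_peak = True
--         i += 1
--     if not seeking_peak and hist[i] < hist[i - 1]:
--         ppv.append(i)
--     return ppv
-- ===== Notes on version B (the rewrite author's own statement) =====
-- stated objective: simpler
-- what changed: Replaced the two mutually recursive functions peaker/pitter with a single iterative scan over the histogram carrying a peak/pit mode flag (the i==0 special case is merged into the peak condition and the final pit check is done after the loop), which also avoids Python's recursion-depth limit on long histograms.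
-- outside the precondition, e.g. on peaker(-1, 0, [], []): A returns [], B returns []
import Mathlib
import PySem

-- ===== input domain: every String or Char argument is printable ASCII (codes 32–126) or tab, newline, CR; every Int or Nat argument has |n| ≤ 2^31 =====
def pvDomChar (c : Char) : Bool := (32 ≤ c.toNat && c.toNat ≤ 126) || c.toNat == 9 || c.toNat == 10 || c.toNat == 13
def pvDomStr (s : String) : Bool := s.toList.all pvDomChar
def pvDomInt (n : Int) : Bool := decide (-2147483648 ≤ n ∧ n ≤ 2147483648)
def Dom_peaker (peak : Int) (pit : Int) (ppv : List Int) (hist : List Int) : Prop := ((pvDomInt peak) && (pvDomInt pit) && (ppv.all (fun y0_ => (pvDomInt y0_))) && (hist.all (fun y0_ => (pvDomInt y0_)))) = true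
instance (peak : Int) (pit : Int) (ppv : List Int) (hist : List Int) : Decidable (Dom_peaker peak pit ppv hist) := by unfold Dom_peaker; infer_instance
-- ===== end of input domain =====

-- B replaces the mutual recursion peaker/pitter by a single iterative scan with a
-- peak/pit mode flag (simpler; same O(n) work). Both versions append to ppv in
-- place in Python; the equivalence proved here is about the return value.

-- ===== PORT A =====
-- Exceptions (IndexError) are modelled by `none` in the cores; `peaker` returns
-- `ppv` on `none`, a junk value only reachable outside Pre_peaker. `fuel` is a
-- totality guard only: every call consumes one unit, and the entry fuel
-- 2*len+1 is more than the recursion depth on any input the cores step through.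
mutual
def pitterCore : Nat → Int → Int → List Int → List Int → Option (List Int)
  | 0, _, _, _, _ => none
  | f + 1, peak, pit, ppv, hist =>
    if pit = (hist.length : Int) - 1 then
      match PySem.List.pyGet? hist pit, PySem.List.pyGet? hist (pit - 1) with
      | some x, some y => if x < y then some (ppv ++ [pit]) else some ppv
      | _, _ => none
    else
      match PySem.List.pyGet? hist (pit - 1), PySem.List.pyGet? hist pit with
      | some a, some b =>
        if a > b then
          match PySem.List.pyGet? hist (pit + 1) with
          | some c =>
            if b ≤ c then peakerCore f (pit + 1) pit (ppv ++ [pit]) hist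
            else pitterCore f peak (pit + 1) ppv hist
          | none => none
        else pitterCore f peak (pit + 1) ppv hist
      | _, _ => none

def peakerCore : Nat → Int → Int → List Int → List Int → Option (List Int)
  | 0, _, _, _, _ => none
  | f + 1, peak, pit, ppv, hist =>
    if peak = 0 then
      -- `peak == 0 and hist[peak] > hist[peak+1]` (short-circuit on peak == 0)
      match PySem.List.pyGet? hist peak, PySem.List.pyGet? hist (peak + 1) with
      | some x, some y =>
        if x > y then pitterCore f peak (peak + 1) (ppv ++ [peak]) hist
        else -- fall through to the elif chain
          if peak = (hist.length : Int) - 1 then some ppv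
          else
            match PySem.List.pyGet? hist (peak - 1), PySem.List.pyGet? hist peak with
            | some a, some b =>
              if a ≤ b then
                match PySem.List.pyGet? hist (peak + 1) with
                | some c =>
                  if b > c then pitterCore f peak (peak + 1) (ppv ++ [peak]) hist
                  else peakerCore f (peak + 1) pit ppv hist
                | none => none
              else peakerCore f (peak + 1) pit ppv hist
            | _, _ => none
      | _, _ => none
    else
      if peak = (hist.length : Int) - 1 then some ppv
      else
        match PySem.List.pyGet? hist (peak - 1), PySem.List.pyGet? hist peak with
        | some a, some b =>
          if a ≤ b then
            match PySem.List.pyGet? hist (peak + 1) with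
            | some c =>
              if b > c then pitterCore f peak (peak + 1) (ppv ++ [peak]) hist
              else peakerCore f (peak + 1) pit ppv hist
            | none => none
          else peakerCore f (peak + 1) pit ppv hist
        | _, _ => none
end

def peaker (peak : Int) (pit : Int) (ppv : List Int) (hist : List Int) : List Int :=
  (peakerCore (2 * hist.length + 1) peak pit ppv hist).getD ppv

-- ===== PORT B =====
-- Source B's while-loop; `seeking` is the mode flag, `i` the scan index, `fuel` a
-- totality guard consumed once per iteration (2*len+1 outlasts any scan the
-- loop performs). Where Source B would raise IndexError (only outside Pre_peaker)
-- the port returns ppv.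
def pvLoop : Nat → Bool → Int → List Int → List Int → List Int
  | 0, _, _, ppv, _ => ppv
  | f + 1, seeking, i, ppv, hist =>
    if i = (hist.length : Int) - 1 then
      if seeking then ppv
      else
        match PySem.List.pyGet? hist i, PySem.List.pyGet? hist (i - 1) with
        | some x, some y => if x < y then ppv ++ [i] else ppv
        | _, _ => ppv
    else
      if seeking then
        if i = 0 then
          match PySem.List.pyGet? hist i, PySem.List.pyGet? hist (i + 1) with
          | some b, some c =>
            if b > c then pvLoop f false (i + 1) (ppv ++ [i]) hist
            else pvLoop f true (i + 1) ppv hist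
          | _, _ => ppv
        else
          match PySem.List.pyGet? hist (i - 1), PySem.List.pyGet? hist i with
          | some a, some b =>
            if a ≤ b then
              match PySem.List.pyGet? hist (i + 1) with
              | some c =>
                if b > c then pvLoop f false (i + 1) (ppv ++ [i]) hist
                else pvLoop f true (i + 1) ppv hist
              | none => ppv
            else pvLoop f true (i + 1) ppv hist
          | _, _ => ppv
      else
        match PySem.List.pyGet? hist (i - 1), PySem.List.pyGet? hist i with
        | some a, some b =>
          if a > b then
            match PySem.List.pyGet? hist (i + 1) with
            | some c =>
              if b ≤ c then pvLoop f true (i + 1) (ppv ++ [i]) hist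
              else pvLoop f false (i + 1) ppv hist
            | none => ppv
          else pvLoop f false (i + 1) ppv hist
        | _, _ => ppv

def peaker_alt (peak : Int) (pit : Int) (ppv : List Int) (hist : List Int) : List Int :=
  pvLoop (2 * hist.length + 1) true peak ppv hist

-- ===== PRECONDITION & SPEC =====
-- Pre_peaker excludes the inputs on which the Python A raises IndexError
-- (histograms of length < 2, and start indices outside [1-len, len-1]) — plus the
-- one accidental corner peak = -1 on an empty histogram, where A returns ppv only
-- because -1 == len([])-1 by negative-index coincidence (see the cite).
def Pre_peaker (peak : Int) (pit : Int) (ppv : List Int) (hist : List Int) : Prop :=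
  2 ≤ hist.length ∧ 1 - (hist.length : Int) ≤ peak ∧ peak ≤ (hist.length : Int) - 1
instance (peak : Int) (pit : Int) (ppv : List Int) (hist : List Int) : Decidable (Pre_peaker peak pit ppv hist) := by unfold Pre_peaker; infer_instance

def pvWitness_peaker : Int × Int × List Int × List Int := (0, 0, [], [3, 1, 2, 2, 0])

def Spec_peaker (peak : Int) (pit : Int) (ppv : List Int) (hist : List Int) (out : List Int) : Prop := out = peaker_alt peak pit ppv hist
instance (peak : Int) (pit : Int) (ppv : List Int) (hist : List Int) (out : List Int) : Decidable (Spec_peaker peak pit ppv hist out) := by unfold Spec_peaker; infer_instance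

-- ===== CLAIM (what is proved, stated in full; the proofs are below) =====
def Claim_equal_peaker : Prop := ∀ (peak : Int) (pit : Int) (ppv : List Int) (hist : List Int), Dom_peaker peak pit ppv hist → Pre_peaker peak pit ppv hist → Spec_peaker peak pit ppv hist (peaker peak pit ppv hist)

-- ===== LEMMAS AND PROOFS =====

theorem pyGet?_none_bounds {xs : List Int} {i : Int}
    (h : PySem.List.pyGet? xs i = none) : i < -(xs.length : Int) ∨ (xs.length : Int) ≤ i := by
  rw [PySem.List.pyGet?_eq_none_iff] at h
  simp [PySem.Raise.InRange] at h
  omega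

theorem pyGet?_some_of_bounds {xs : List Int} {i : Int}
    (h1 : -(xs.length : Int) ≤ i) (h2 : i < (xs.length : Int)) :
    ∃ v, PySem.List.pyGet? xs i = some v := by
  cases hv : PySem.List.pyGet? xs i with
  | some v => exact ⟨v, rfl⟩
  | none => rcases pyGet?_none_bounds hv with h | h <;> omega

-- one-step equations for the A-side cores
theorem stepA1 {f : Nat} {peak pit : Int} {ppv hist : List Int} {x y : Int}
    (hz : peak = 0) (hx : PySem.List.pyGet? hist peak = some x)
    (hy : PySem.List.pyGet? hist (peak + 1) = some y) (hgt : x > y) :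
    peakerCore (f + 1) peak pit ppv hist = pitterCore f peak (peak + 1) (ppv ++ [peak]) hist := by
  simp only [peakerCore]
  rw [if_pos hz]
  split
  case _ x' y' hgx hgy =>
    rw [hx] at hgx; cases hgx
    rw [hy] at hgy; cases hgy
    rw [if_pos hgt]
  case _ hno => exact (hno x y hx hy).elim

theorem stepA2 {f : Nat} {peak pit : Int} {ppv hist : List Int} {x y a : Int}
    (hz : peak = 0) (hx : PySem.List.pyGet? hist peak = some x)
    (hy : PySem.List.pyGet? hist (peak + 1) = some y) (hgt : ¬ x > y)
    (hne : ¬ peak = (hist.length : Int) - 1)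
    (ha : PySem.List.pyGet? hist (peak - 1) = some a) :
    peakerCore (f + 1) peak pit ppv hist = peakerCore f (peak + 1) pit ppv hist := by
  simp only [peakerCore]
  rw [if_pos hz]
  split
  case _ x' y' hgx hgy =>
    rw [hx] at hgx; cases hgx
    rw [hy] at hgy; cases hgy
    rw [if_neg hgt, if_neg hne]
    split
    case _ a' b' hga hgb =>
      rw [ha] at hga; cases hga
      rw [hx] at hgb; cases hgb
      by_cases hab : a ≤ x
      · rw [if_pos hab]
        split
        case _ c' hgc =>
          rw [hy] at hgc; cases hgc
          rw [if_neg hgt]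
        case _ hgc => rw [hy] at hgc; cases hgc
      · rw [if_neg hab]
    case _ hno => exact (hno a x ha hx).elim
  case _ hno => exact (hno x y hx hy).elim

theorem stepA3 {f : Nat} {peak pit : Int} {ppv hist : List Int}
    (hz : ¬ peak = 0) (hne : peak = (hist.length : Int) - 1) :
    peakerCore (f + 1) peak pit ppv hist = some ppv := by
  simp only [peakerCore]
  rw [if_neg hz, if_pos hne]

theorem stepA4 {f : Nat} {peak pit : Int} {ppv hist : List Int} {a b c : Int}
    (hz : ¬ peak = 0) (hne : ¬ peak = (hist.length : Int) - 1)
    (ha : PySem.List.pyGet? hist (peak - 1) = some a)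
    (hb : PySem.List.pyGet? hist peak = some b)
    (hc : PySem.List.pyGet? hist (peak + 1) = some c) :
    peakerCore (f + 1) peak pit ppv hist =
      if a ≤ b ∧ b > c then pitterCore f peak (peak + 1) (ppv ++ [peak]) hist
      else peakerCore f (peak + 1) pit ppv hist := by
  simp only [peakerCore]
  rw [if_neg hz, if_neg hne]
  split
  case _ a' b' hga hgb =>
    rw [ha] at hga; cases hga
    rw [hb] at hgb; cases hgb
    by_cases hab : a ≤ b
    · rw [if_pos hab]
      split
      case _ c' hgc =>
        rw [hc] at hgc; cases hgc
        by_cases hbc : b > c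
        · rw [if_pos hbc, if_pos ⟨hab, hbc⟩]
        · rw [if_neg hbc, if_neg (by tauto)]
      case _ hgc => rw [hc] at hgc; cases hgc
    · rw [if_neg hab, if_neg (by tauto)]
  case _ hno => exact (hno a b ha hb).elim

theorem stepP1 {f : Nat} {peak pit : Int} {ppv hist : List Int} {x y : Int}
    (hne : pit = (hist.length : Int) - 1)
    (hx : PySem.List.pyGet? hist pit = some x)
    (hy : PySem.List.pyGet? hist (pit - 1) = some y) :
    pitterCore (f + 1) peak pit ppv hist = some (if x < y then ppv ++ [pit] else ppv) := by
  simp only [pitterCore]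
  rw [if_pos hne]
  split
  case _ x' y' hgx hgy =>
    rw [hx] at hgx; cases hgx
    rw [hy] at hgy; cases hgy
    by_cases hlt : x < y
    · rw [if_pos hlt, if_pos hlt]
    · rw [if_neg hlt, if_neg hlt]
  case _ hno => exact (hno x y hx hy).elim

theorem stepP2 {f : Nat} {peak pit : Int} {ppv hist : List Int} {a b c : Int}
    (hne : ¬ pit = (hist.length : Int) - 1)
    (ha : PySem.List.pyGet? hist (pit - 1) = some a)
    (hb : PySem.List.pyGet? hist pit = some b)
    (hc : PySem.List.pyGet? hist (pit + 1) = some c) :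
    pitterCore (f + 1) peak pit ppv hist =
      if a > b ∧ b ≤ c then peakerCore f (pit + 1) pit (ppv ++ [pit]) hist
      else pitterCore f peak (pit + 1) ppv hist := by
  simp only [pitterCore]
  rw [if_neg hne]
  split
  case _ a' b' hga hgb =>
    rw [ha] at hga; cases hga
    rw [hb] at hgb; cases hgb
    by_cases hab : a > b
    · rw [if_pos hab]
      split
      case _ c' hgc =>
        rw [hc] at hgc; cases hgc
        by_cases hbc : b ≤ c
        · rw [if_pos hbc, if_pos ⟨hab, hbc⟩]
        · rw [if_neg hbc, if_neg (by tauto)]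
      case _ hgc => rw [hc] at hgc; cases hgc
    · rw [if_neg hab, if_neg (by tauto)]
  case _ hno => exact (hno a b ha hb).elim

-- one-step equations for the B-side loop
theorem stepL1 {f : Nat} {i : Int} {ppv hist : List Int}
    (h : i = (hist.length : Int) - 1) :
    pvLoop (f + 1) true i ppv hist = ppv := by
  simp only [pvLoop]
  rw [if_pos h]; simp only [reduceIte]

theorem stepL2 {f : Nat} {i : Int} {ppv hist : List Int} {x y : Int}
    (h : i = (hist.length : Int) - 1)
    (hx : PySem.List.pyGet? hist i = some x)
    (hy : PySem.List.pyGet? hist (i - 1) = some y) :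
    pvLoop (f + 1) false i ppv hist = if x < y then ppv ++ [i] else ppv := by
  simp only [pvLoop]
  rw [if_pos h]; simp only [Bool.false_eq_true, reduceIte]
  split
  case _ x' y' hgx hgy =>
    rw [hx] at hgx; cases hgx
    rw [hy] at hgy; cases hgy
    rfl
  case _ hno => exact (hno x y hx hy).elim

theorem stepL3 {f : Nat} {i : Int} {ppv hist : List Int} {b c : Int}
    (h : ¬ i = (hist.length : Int) - 1) (hz : i = 0)
    (hb : PySem.List.pyGet? hist i = some b)
    (hc : PySem.List.pyGet? hist (i + 1) = some c) :
    pvLoop (f + 1) true i ppv hist =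
      if b > c then pvLoop f false (i + 1) (ppv ++ [i]) hist
      else pvLoop f true (i + 1) ppv hist := by
  simp only [pvLoop]
  rw [if_neg h]; simp only [reduceIte]; rw [if_pos hz]
  split
  case _ b' c' hgb hgc =>
    rw [hb] at hgb; cases hgb
    rw [hc] at hgc; cases hgc
    rfl
  case _ hno => exact (hno b c hb hc).elim

theorem stepL4 {f : Nat} {i : Int} {ppv hist : List Int} {a b c : Int}
    (h : ¬ i = (hist.length : Int) - 1) (hz : ¬ i = 0)
    (ha : PySem.List.pyGet? hist (i - 1) = some a)
    (hb : PySem.List.pyGet? hist i = some b)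
    (hc : PySem.List.pyGet? hist (i + 1) = some c) :
    pvLoop (f + 1) true i ppv hist =
      if a ≤ b ∧ b > c then pvLoop f false (i + 1) (ppv ++ [i]) hist
      else pvLoop f true (i + 1) ppv hist := by
  simp only [pvLoop]
  rw [if_neg h]; simp only [reduceIte]; rw [if_neg hz]
  split
  case _ a' b' hga hgb =>
    rw [ha] at hga; cases hga
    rw [hb] at hgb; cases hgb
    by_cases hab : a ≤ b
    · rw [if_pos hab]
      split
      case _ c' hgc =>
        rw [hc] at hgc; cases hgc
        by_cases hbc : b > c
        · rw [if_pos hbc, if_pos ⟨hab, hbc⟩]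
        · rw [if_neg hbc, if_neg (by tauto)]
      case _ hgc => rw [hc] at hgc; cases hgc
    · rw [if_neg hab, if_neg (by tauto)]
  case _ hno => exact (hno a b ha hb).elim

theorem stepL5 {f : Nat} {i : Int} {ppv hist : List Int} {a b c : Int}
    (h : ¬ i = (hist.length : Int) - 1)
    (ha : PySem.List.pyGet? hist (i - 1) = some a)
    (hb : PySem.List.pyGet? hist i = some b)
    (hc : PySem.List.pyGet? hist (i + 1) = some c) :
    pvLoop (f + 1) false i ppv hist =
      if a > b ∧ b ≤ c then pvLoop f true (i + 1) (ppv ++ [i]) hist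
      else pvLoop f false (i + 1) ppv hist := by
  simp only [pvLoop]
  rw [if_neg h]; simp only [Bool.false_eq_true, reduceIte]
  split
  case _ a' b' hga hgb =>
    rw [ha] at hga; cases hga
    rw [hb] at hgb; cases hgb
    by_cases hab : a > b
    · rw [if_pos hab]
      split
      case _ c' hgc =>
        rw [hc] at hgc; cases hgc
        by_cases hbc : b ≤ c
        · rw [if_pos hbc, if_pos ⟨hab, hbc⟩]
        · rw [if_neg hbc, if_neg (by tauto)]
      case _ hgc => rw [hc] at hgc; cases hgc
    · rw [if_neg hab, if_neg (by tauto)]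
  case _ hno => exact (hno a b ha hb).elim

-- the cores and the loop step through the indices in lockstep, one fuel unit
-- per index, so the same fuel value works on both sides
theorem cores_eq (fuel : Nat) :
    (∀ (peak pit : Int) (ppv hist : List Int),
        2 ≤ hist.length → 1 - (hist.length : Int) ≤ peak → peak ≤ (hist.length : Int) - 1 →
        ((hist.length : Int) - 1 - peak).toNat < fuel →
        peakerCore fuel peak pit ppv hist = some (pvLoop fuel true peak ppv hist)) ∧
    (∀ (peak pit : Int) (ppv hist : List Int),
        2 ≤ hist.length → 2 - (hist.length : Int) ≤ pit → pit ≤ (hist.length : Int) - 1 →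
        ((hist.length : Int) - 1 - pit).toNat < fuel →
        pitterCore fuel peak pit ppv hist = some (pvLoop fuel false pit ppv hist)) := by
  induction fuel with
  | zero => exact ⟨fun _ _ _ _ _ _ _ h => absurd h (by omega),
                   fun _ _ _ _ _ _ _ h => absurd h (by omega)⟩
  | succ f IH =>
    constructor
    · intro peak pit ppv hist hn hlo hhi hk
      by_cases hz : peak = 0
      · obtain ⟨x, hx⟩ := pyGet?_some_of_bounds (xs := hist) (i := peak) (by omega) (by omega)
        obtain ⟨y, hy⟩ := pyGet?_some_of_bounds (xs := hist) (i := peak + 1) (by omega) (by omega)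
        have hne : ¬ peak = (hist.length : Int) - 1 := by omega
        by_cases hgt : x > y
        · rw [stepA1 hz hx hy hgt, stepL3 hne hz hx hy, if_pos hgt]
          exact IH.2 peak (peak + 1) (ppv ++ [peak]) hist hn (by omega) (by omega) (by omega)
        · obtain ⟨a, ha⟩ := pyGet?_some_of_bounds (xs := hist) (i := peak - 1) (by omega) (by omega)
          rw [stepA2 hz hx hy hgt hne ha, stepL3 hne hz hx hy, if_neg hgt]
          exact IH.1 (peak + 1) pit ppv hist hn (by omega) (by omega) (by omega)
      · by_cases hne : peak = (hist.length : Int) - 1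
        · rw [stepA3 hz hne, stepL1 hne]
        · obtain ⟨a, ha⟩ := pyGet?_some_of_bounds (xs := hist) (i := peak - 1) (by omega) (by omega)
          obtain ⟨b, hb⟩ := pyGet?_some_of_bounds (xs := hist) (i := peak) (by omega) (by omega)
          obtain ⟨c, hc⟩ := pyGet?_some_of_bounds (xs := hist) (i := peak + 1) (by omega) (by omega)
          rw [stepA4 hz hne ha hb hc, stepL4 hne hz ha hb hc]
          split_ifs with hcond
          · exact IH.2 peak (peak + 1) (ppv ++ [peak]) hist hn (by omega) (by omega) (by omega)
          · exact IH.1 (peak + 1) pit ppv hist hn (by omega) (by omega) (by omega)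
    · intro peak pit ppv hist hn hlo hhi hk
      by_cases hne : pit = (hist.length : Int) - 1
      · obtain ⟨x, hx⟩ := pyGet?_some_of_bounds (xs := hist) (i := pit) (by omega) (by omega)
        obtain ⟨y, hy⟩ := pyGet?_some_of_bounds (xs := hist) (i := pit - 1) (by omega) (by omega)
        rw [stepP1 hne hx hy, stepL2 hne hx hy]
      · obtain ⟨a, ha⟩ := pyGet?_some_of_bounds (xs := hist) (i := pit - 1) (by omega) (by omega)
        obtain ⟨b, hb⟩ := pyGet?_some_of_bounds (xs := hist) (i := pit) (by omega) (by omega)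
        obtain ⟨c, hc⟩ := pyGet?_some_of_bounds (xs := hist) (i := pit + 1) (by omega) (by omega)
        rw [stepP2 hne ha hb hc, stepL5 hne ha hb hc]
        split_ifs with hcond
        · exact IH.1 (pit + 1) pit (ppv ++ [pit]) hist hn (by omega) (by omega) (by omega)
        · exact IH.2 peak (pit + 1) ppv hist hn (by omega) (by omega) (by omega)

-- ===== VERDICT (by name: the statement is the Claim_ definition above) =====
theorem peaker_spec : Claim_equal_peaker := by
  intro peak pit ppv hist _hdom hpre
  obtain ⟨hn, hlo, hhi⟩ := hpre
  unfold Spec_peaker peaker peaker_alt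
  rw [(cores_eq (2 * hist.length + 1)).1 peak pit ppv hist hn hlo hhi (by omega)]
  rfl
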